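-- pv_equiv track=rewrite | github.com/ninja-left/CRYPT-GUI | modules/cracker.py | generate_possible_keys
-- ===== SOURCE A (Python) =====
-- def generate_possible_keys(
--     length: int,
--     ramp: bool,
--     have_letters: bool,
--     have_symbols: bool,
--     have_numbers: bool,
--     have_space: bool,
--     start_length: int = 1,
-- ) -> int:
--     """
--     This function calculates (Number of options) ^ (Length of password)
--     and if ramp is True, calculate the same for each length and return sum.
--     """
--     total_combinations = 0
--     total_options = 0
--     L = 52  # Letters
--     S = 32  # Symbols (Punctuations)
--     D = 10  # Digits
--     W = 6  # Whitespace
--     if have_letters: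
--         total_options += L
--     if have_symbols:
--         total_options += S
--     if have_numbers:
--         total_options += D
--     if have_space:
--         total_options += W
--     if start_length < 1:
--         start_length = 1
--     if ramp:
--         for i in range(start_length, length + 1):
--             t = total_options**i
--             total_combinations += t
--     else:
--         total_combinations = total_options**length
--     return total_combinations
-- ===== SOURCE B (Python) =====
-- def generate_possible_keys(
--     length: int,
--     ramp: bool,
--     have_letters: bool,
--     have_symbols: bool,
--     have_numbers: bool,
--     have_space: bool,
--     start_length: int = 1,
-- ) -> int:
--     r = 52 * have_letters + 32 * have_symbols + 10 * have_numbers + 6 * have_space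
--     if not ramp:
--         return r**length
--     s = max(start_length, 1)
--     if length < s:
--         return 0
--     if r == 0:
--         return 0
--     if r == 1:
--         return length - s + 1
--     return (r ** (length + 1) - r**s) // (r - 1)
-- ===== Notes on version B (the rewrite author's own statement) =====
-- stated objective: alternative
-- what changed: Replaces the per-length loop of big-int powers with the closed-form geometric series (r**(length+1) - r**start)//(r-1), with direct answers for r=0 and r=1; on huge outputs the big-int division costs what the loop saved, so the cost is similar.
import Mathlib
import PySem

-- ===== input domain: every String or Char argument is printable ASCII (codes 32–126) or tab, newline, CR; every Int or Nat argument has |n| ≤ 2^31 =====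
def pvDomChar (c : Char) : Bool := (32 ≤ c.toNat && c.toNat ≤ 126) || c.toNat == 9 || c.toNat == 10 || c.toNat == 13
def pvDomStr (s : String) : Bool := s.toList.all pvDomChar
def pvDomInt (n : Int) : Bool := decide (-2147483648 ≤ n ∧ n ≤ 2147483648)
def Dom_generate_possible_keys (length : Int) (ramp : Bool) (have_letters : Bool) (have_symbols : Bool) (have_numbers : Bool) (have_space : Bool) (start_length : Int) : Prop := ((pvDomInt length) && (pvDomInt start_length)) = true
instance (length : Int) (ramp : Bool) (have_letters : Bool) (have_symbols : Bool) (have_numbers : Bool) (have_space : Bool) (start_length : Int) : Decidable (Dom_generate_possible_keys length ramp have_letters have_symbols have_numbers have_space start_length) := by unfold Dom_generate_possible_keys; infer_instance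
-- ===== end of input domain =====

-- B replaces A's per-length loop of big-int powers by the closed-form geometric series
-- (r^(length+1) - r^start) // (r-1); a genuinely different algorithm of similar measured cost.

-- ===== PORT A =====
-- exponents: in the ramp loop every i ≥ start' ≥ 1, and in the other branch Pre_ gives 0 ≤ length,
-- so `^ ·.toNat` is exactly Python's `**` on the admitted inputs.
def generate_possible_keys (length : Int) (ramp : Bool) (have_letters : Bool) (have_symbols : Bool) (have_numbers : Bool) (have_space : Bool) (start_length : Int) : Int :=
  let total_options : Int :=
    0 + (if have_letters then 52 else 0) + (if have_symbols then 32 else 0)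
      + (if have_numbers then 10 else 0) + (if have_space then 6 else 0)
  let start' : Int := if start_length < 1 then 1 else start_length
  if ramp then
    (PySem.List.pyRange start' (length + 1) 1).foldl
      (fun total_combinations i => total_combinations + total_options ^ i.toNat) 0
  else
    total_options ^ length.toNat

-- ===== PORT B =====
def generate_possible_keys_alt (length : Int) (ramp : Bool) (have_letters : Bool) (have_symbols : Bool) (have_numbers : Bool) (have_space : Bool) (start_length : Int) : Int :=
  let r : Int := 52 * (if have_letters then 1 else 0) + 32 * (if have_symbols then 1 else 0)
      + 10 * (if have_numbers then 1 else 0) + 6 * (if have_space then 1 else 0)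
  if !ramp then r ^ length.toNat
  else
    let s : Int := max start_length 1
    if length < s then 0
    else if r = 0 then 0
    else if r = 1 then length - s + 1
    else PySem.Int.floordiv (r ^ (length + 1).toNat - r ^ s.toNat) (r - 1)

-- ===== PRECONDITION & SPEC =====
-- Pre_ excludes only ramp = false with a negative length: there Python's `**` returns a float
-- (or raises ZeroDivisionError when the option count is 0), not a value of the declared int type.
def Pre_generate_possible_keys (length : Int) (ramp : Bool) (have_letters : Bool) (have_symbols : Bool) (have_numbers : Bool) (have_space : Bool) (start_length : Int) : Prop :=
  ramp = true ∨ 0 ≤ length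
instance (length : Int) (ramp : Bool) (have_letters : Bool) (have_symbols : Bool) (have_numbers : Bool) (have_space : Bool) (start_length : Int) : Decidable (Pre_generate_possible_keys length ramp have_letters have_symbols have_numbers have_space start_length) := by unfold Pre_generate_possible_keys; infer_instance
def pvWitness_generate_possible_keys : Int × Bool × Bool × Bool × Bool × Bool × Int := (4, true, true, false, true, false, 2)

def Spec_generate_possible_keys (length : Int) (ramp : Bool) (have_letters : Bool) (have_symbols : Bool) (have_numbers : Bool) (have_space : Bool) (start_length : Int) (out : Int) : Prop := out = generate_possible_keys_alt length ramp have_letters have_symbols have_numbers have_space start_length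
instance (length : Int) (ramp : Bool) (have_letters : Bool) (have_symbols : Bool) (have_numbers : Bool) (have_space : Bool) (start_length : Int) (out : Int) : Decidable (Spec_generate_possible_keys length ramp have_letters have_symbols have_numbers have_space start_length out) := by unfold Spec_generate_possible_keys; infer_instance

-- ===== CLAIM (what is proved, stated in full; the proofs are below) =====
def Claim_equal_generate_possible_keys : Prop := ∀ (length : Int) (ramp : Bool) (have_letters : Bool) (have_symbols : Bool) (have_numbers : Bool) (have_space : Bool) (start_length : Int), Dom_generate_possible_keys length ramp have_letters have_symbols have_numbers have_space start_length → Pre_generate_possible_keys length ramp have_letters have_symbols have_numbers have_space start_length → Spec_generate_possible_keys length ramp have_letters have_symbols have_numbers have_space start_length (generate_possible_keys length ramp have_letters have_symbols have_numbers have_space start_length)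

-- ===== LEMMAS AND PROOFS =====

-- the fold is 'initial accumulator + sum of the mapped powers'
theorem foldl_add_pow (r : Int) (l : List Int) (c : Int) :
    l.foldl (fun acc i => acc + r ^ i.toNat) c = c + (l.map (fun i => r ^ i.toNat)).sum := by
  induction l generalizing c with
  | nil => simp
  | cons x xs ih => simp [List.foldl_cons, ih (c + r ^ x.toNat)]; ring

-- telescoping geometric identity for the sum over range(s, s+n)
theorem geom_mul (r s : Int) (hs : 0 ≤ s) (n : Nat) :
    (r - 1) * ((PySem.List.pyRange s (s + n) 1).map (fun i => r ^ i.toNat)).sum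
      = r ^ (s + n).toNat - r ^ s.toNat := by
  induction n with
  | zero => simp [PySem.List.pyRange_one_eq_nil (by omega : s + (0:Nat) ≤ s)]
  | succ n ih =>
    have h1 : s + ((n : Int) + 1) = (s + n) + 1 := by ring
    have h2 : PySem.List.pyRange s ((s + n) + 1) 1
        = PySem.List.pyRange s (s + n) 1 ++ [s + n] :=
      PySem.List.pyRange_one_succ_right (by omega)
    have h3 : (s + (n : Int) + 1).toNat = (s + n).toNat + 1 := by omega
    push_cast at h1 h3 ⊢
    rw [h1, h2]
    simp only [List.map_append, List.sum_append, List.map_cons, List.map_nil,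
      List.sum_cons, List.sum_nil]
    rw [mul_add, ih, h3]
    ring

-- every element of range(s, b) with 1 ≤ s contributes 0 when r = 0
theorem sum_pow_zero (s b : Int) (hs : 1 ≤ s) :
    ((PySem.List.pyRange s b 1).map (fun i => (0:Int) ^ i.toNat)).sum = 0 := by
  apply List.sum_eq_zero
  intro x hx
  simp only [List.mem_map] at hx
  obtain ⟨i, hi, rfl⟩ := hx
  have := (PySem.List.mem_pyRange_one).mp hi
  have : i.toNat ≠ 0 := by omega
  simp [zero_pow this]

-- sum over range(s, b) when r = 1 is the number of terms
theorem sum_pow_one (s b : Int) :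
    ((PySem.List.pyRange s b 1).map (fun i => (1:Int) ^ i.toNat)).sum = (b - s).toNat := by
  simp only [one_pow]
  rw [List.map_const']
  simp [PySem.List.length_pyRange_one]

theorem generate_possible_keys_spec : Claim_equal_generate_possible_keys := by
  intro length ramp hl hs hn hsp start_length _ hpre
  unfold Spec_generate_possible_keys generate_possible_keys generate_possible_keys_alt
  have hr : (0:Int) + (if hl then 52 else 0) + (if hs then 32 else 0)
      + (if hn then 10 else 0) + (if hsp then 6 else 0)
      = 52 * (if hl then 1 else 0) + 32 * (if hs then 1 else 0)
      + 10 * (if hn then 1 else 0) + 6 * (if hsp then 1 else 0) := by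
    cases hl <;> cases hs <;> cases hn <;> cases hsp <;> norm_num
  simp only [hr]
  set r : Int := 52 * (if hl then 1 else 0) + 32 * (if hs then 1 else 0)
      + 10 * (if hn then 1 else 0) + 6 * (if hsp then 1 else 0) with hrdef
  have hrpos : 0 ≤ r := by
    rw [hrdef]; cases hl <;> cases hs <;> cases hn <;> cases hsp <;> norm_num
  cases ramp with
  | false => simp
  | true =>
    simp only [Bool.not_true, if_true, Bool.false_eq_true, if_false]
    have hsmax : (if start_length < 1 then 1 else start_length) = max start_length 1 := by
      split <;> omega
    rw [hsmax]
    set s : Int := max start_length 1 with hsdef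
    have hs1 : 1 ≤ s := le_max_right _ _
    by_cases hls : length < s
    · rw [if_pos hls, PySem.List.pyRange_one_eq_nil (by omega)]
      simp
    · rw [if_neg hls]
      push_neg at hls
      rw [foldl_add_pow, zero_add]
      have hn' : length + 1 = s + ((length + 1 - s).toNat : Int) := by omega
      by_cases hr0 : r = 0
      · rw [if_pos hr0, hr0, sum_pow_zero s (length + 1) hs1]
      · rw [if_neg hr0]
        by_cases hr1 : r = 1
        · rw [if_pos hr1, hr1, sum_pow_one s (length + 1)]
          omega
        · rw [if_neg hr1]
          have hg := geom_mul r s (by omega) (length + 1 - s).toNat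
          rw [← hn'] at hg
          have hdpos : (0:Int) < r - 1 := by omega
          rw [PySem.Int.floordiv_eq_ediv_of_pos hdpos, ← hg,
            Int.mul_ediv_cancel_left _ (by omega)]
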